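-- pv_equiv track=rewrite | github.com/JPCardoso13/ATP2022 | TPC6/obras.py | distribAno
-- ===== SOURCE A (Python) =====
-- def distribAno(obras):
--
--     dicAno = {}
--
--     for obra in obras:
--
--         if obra[2] in dicAno.keys():
--             dicAno[obra[2]] = dicAno[obra[2]] + 1
--
--         elif obra[2] not in dicAno.keys():
--             dicAno[obra[2]] = 1
--
--     return dicAno
-- ===== SOURCE B (Python) =====
-- def distribAno(obras):
--     years = [obra[2] for obra in obras]
--     return {ano: years.count(ano) for ano in dict.fromkeys(years)}
-- ===== Notes on version B (the rewrite author's own statement) =====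
-- stated objective: idiomatic
-- what changed: Replaced the incremental dict-accumulation loop (membership test + counter update per element) by a two-line comprehension: extract the year list once, deduplicate it in first-occurrence order with dict.fromkeys, and compute each year's total directly with list.count.
import Mathlib
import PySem

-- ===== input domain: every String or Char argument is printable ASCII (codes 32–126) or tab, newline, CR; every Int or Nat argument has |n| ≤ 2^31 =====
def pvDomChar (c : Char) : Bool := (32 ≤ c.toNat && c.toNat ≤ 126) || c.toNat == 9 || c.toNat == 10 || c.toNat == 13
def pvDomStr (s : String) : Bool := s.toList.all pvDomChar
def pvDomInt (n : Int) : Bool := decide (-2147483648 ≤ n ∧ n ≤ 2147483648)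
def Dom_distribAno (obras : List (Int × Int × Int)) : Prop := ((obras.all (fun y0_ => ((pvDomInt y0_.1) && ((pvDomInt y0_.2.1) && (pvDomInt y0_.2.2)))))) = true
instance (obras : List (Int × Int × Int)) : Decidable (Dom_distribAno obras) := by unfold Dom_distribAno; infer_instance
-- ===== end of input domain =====

-- B replaces A's incremental dict-accumulation loop by ordered dedup + per-key count (idiomatic; return value identical).

-- ===== PORT A =====
def distribAno (obras : List (Int × Int × Int)) : List (Int × Int) :=
  (obras.foldl
    (fun dicAno obra =>
      if dicAno.contains obra.2.2 then
        dicAno.insert obra.2.2 (dicAno.getD obra.2.2 0 + 1)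
      else
        dicAno.insert obra.2.2 1)
    (PySem.Dict.empty : PySem.Dict Int Int)).items

-- ===== PORT B =====
def distribAno_alt (obras : List (Int × Int × Int)) : List (Int × Int) :=
  let years := obras.map (fun obra => obra.2.2)
  (PySem.List.dedup years).map (fun ano => (ano, (years.count ano : Int)))

-- ===== PRECONDITION & SPEC =====
def Spec_distribAno (obras : List (Int × Int × Int)) (out : List (Int × Int)) : Prop := out = distribAno_alt obras
instance (obras : List (Int × Int × Int)) (out : List (Int × Int)) : Decidable (Spec_distribAno obras out) := by unfold Spec_distribAno; infer_instance

-- ===== CLAIM (what is proved, stated in full; the proofs are below) =====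
def Claim_equal_distribAno : Prop := ∀ (obras : List (Int × Int × Int)), Dom_distribAno obras → Spec_distribAno obras (distribAno obras)

-- ===== LEMMAS AND PROOFS =====

-- A's branching step is the counter step: on an absent key getD yields the default 0.
theorem distribAno_step_eq :
    (fun (dicAno : PySem.Dict Int Int) (obra : Int × Int × Int) =>
      if dicAno.contains obra.2.2 then
        dicAno.insert obra.2.2 (dicAno.getD obra.2.2 0 + 1)
      else
        dicAno.insert obra.2.2 1)
    = (fun (d : PySem.Dict Int Int) (obra : Int × Int × Int) =>
        d.insert obra.2.2 (d.getD obra.2.2 0 + 1)) := by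
  funext d obra
  by_cases h : d.contains obra.2.2
  · simp [h]
  · rw [PySem.Dict.getD_of_not_contains d 0 (by simpa using h)]
    simp [h]

-- ===== VERDICT (by name: the statement is the Claim_ definition above) =====
theorem distribAno_spec : Claim_equal_distribAno := by
  intro obras _
  unfold Spec_distribAno distribAno distribAno_alt
  rw [distribAno_step_eq,
    ← List.foldl_map (f := fun obra : Int × Int × Int => obra.2.2)
      (g := fun (d : PySem.Dict Int Int) y => d.insert y (d.getD y 0 + 1)),
    PySem.Dict.foldl_insert_getD_add_one_eq_counter, PySem.Dict.items_counter]
  simp only [PySem.List.dedup_eq_ofList]
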